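-- pv_equiv track=rewrite | github.com/george123wright/Fintech-Project | backend/app/services/valuation/orchestrator.py | _statement_columns
-- ===== SOURCE A (Python) =====
-- from typing import Any
--
-- def _statement_columns(row: dict[str, Any] | None) -> list[str]:
--     if row is None:
--         return []
--     cols = [key for key in row.keys() if key != "Metric"]
--
--     def sort_key(col: str) -> tuple[int, str]:
--         # ISO dates sort lexicographically; keep those first, descending.
--         if len(col) == 10 and col[4] == "-" and col[7] == "-":
--             return (0, col)
--         return (1, col)
--
--     return sorted(cols, key=sort_key, reverse=True)
-- ===== SOURCE B (Python) =====
-- def _statement_columns(row):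
--     if row is None:
--         return []
--     dates = []
--     others = []
--     for key in row.keys():
--         if key == "Metric":
--             continue
--         if len(key) == 10 and key[4] == "-" and key[7] == "-":
--             dates.append(key)
--         else:
--             others.append(key)
--     return sorted(others, reverse=True) + sorted(dates, reverse=True)
-- ===== Notes on version B (the rewrite author's own statement) =====
-- stated objective: alternative
-- what changed: Replaces the single sort with a composite (group, col) key by a one-pass partition of the keys into a date bucket and an others bucket, then two plain descending string sorts concatenated (others first, then dates).
import Mathlib
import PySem

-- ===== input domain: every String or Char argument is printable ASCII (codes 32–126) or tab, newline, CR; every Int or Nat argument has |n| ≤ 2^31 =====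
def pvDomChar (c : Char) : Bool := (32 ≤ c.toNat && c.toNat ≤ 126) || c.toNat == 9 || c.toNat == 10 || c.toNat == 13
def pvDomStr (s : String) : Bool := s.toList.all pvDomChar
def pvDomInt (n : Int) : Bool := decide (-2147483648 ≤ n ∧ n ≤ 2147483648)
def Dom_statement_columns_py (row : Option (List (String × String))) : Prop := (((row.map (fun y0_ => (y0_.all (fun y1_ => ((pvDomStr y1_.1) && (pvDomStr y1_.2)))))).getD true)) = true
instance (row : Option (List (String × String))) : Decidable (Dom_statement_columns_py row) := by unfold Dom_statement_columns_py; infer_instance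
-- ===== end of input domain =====

-- B replaces A's single composite-key sort by a one-pass partition into date/other buckets followed by two plain descending sorts (alternative decomposition, same cost).


-- shared helper: the ISO-date shape test `len(col) == 10 and col[4] == "-" and col[7] == "-"`
def pvIsoShape (col : String) : Bool :=
  PySem.Str.len col == 10 && PySem.Str.pyGet? col 4 == some '-' && PySem.Str.pyGet? col 7 == some '-'

-- ===== PORT A =====
def statement_columns_py (row : Option (List (String × String))) : List String :=
  match row with
  | none => []
  | some r =>
    let cols := (PySem.List.dedup (r.map Prod.fst)).filter (fun key => key != "Metric")
    PySem.List.sorted2 cols (fun col => if pvIsoShape col then (0 : Int) else 1) (fun col => col) true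

-- ===== PORT B =====
def statement_columns_py_alt (row : Option (List (String × String))) : List String :=
  match row with
  | none => []
  | some r =>
    let p : List String × List String :=
      (PySem.List.dedup (r.map Prod.fst)).foldl
        (fun acc key =>
          if key == "Metric" then acc
          else if pvIsoShape key then (acc.1 ++ [key], acc.2)
          else (acc.1, acc.2 ++ [key]))
        ([], [])
    PySem.List.sorted p.2 (fun x => x) true ++ PySem.List.sorted p.1 (fun x => x) true

-- ===== PRECONDITION & SPEC =====
def Spec_statement_columns_py (row : Option (List (String × String))) (out : List String) : Prop := out = statement_columns_py_alt row
instance (row : Option (List (String × String))) (out : List String) : Decidable (Spec_statement_columns_py row out) := by unfold Spec_statement_columns_py; infer_instance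

-- ===== CLAIM (what is proved, stated in full; the proofs are below) =====
def Claim_equal_statement_columns_py : Prop := ∀ (row : Option (List (String × String))), Dom_statement_columns_py row → Spec_statement_columns_py row (statement_columns_py row)

-- ===== LEMMAS AND PROOFS =====

-- A's sorted2 with the (group, col) tuple key is `sorted` with the lexicographic key
theorem pv_sorted2_eq_sorted_lex (xs : List String) (k1 : String → Int) :
    PySem.List.sorted2 xs k1 (fun col => col) true
      = PySem.List.sorted xs (fun col => toLex ((k1 col : Int), col)) true := by
  rw [PySem.List.sorted_rev_eq_foldl_insertBy]
  simp only [PySem.List.sorted2, if_true]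
  have hf : (fun (a b : String) => decide (k1 b < k1 a) || (!decide (k1 a < k1 b) && decide (b < a)))
      = (fun (a b : String) => decide ((toLex (k1 b, b) : Lex (Int × String)) < toLex (k1 a, a))) := by
    funext a b
    rcases lt_trichotomy (k1 a) (k1 b) with h | h | h
    · simp [Prod.Lex.lt_iff, h, not_lt_of_gt h, h.ne']
    · simp [Prod.Lex.lt_iff, h]
    · simp [Prod.Lex.lt_iff, h, not_lt_of_gt h, h.ne]
  rw [hf]

-- B's fold is the two filters of the keys, appended to the accumulators
theorem pv_fold_partition (ks : List String) (d o : List String) :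
    ks.foldl
        (fun (acc : List String × List String) key =>
          if key == "Metric" then acc
          else if pvIsoShape key then (acc.1 ++ [key], acc.2)
          else (acc.1, acc.2 ++ [key]))
        (d, o)
      = (d ++ ((ks.filter (fun k => k != "Metric")).filter (fun k => pvIsoShape k)),
         o ++ ((ks.filter (fun k => k != "Metric")).filter (fun k => !pvIsoShape k))) := by
  induction ks generalizing d o with
  | nil => simp
  | cons k t ih =>
    simp only [List.foldl_cons]
    by_cases hm : k = "Metric"
    · rw [if_pos (by simp [hm]), ih]
      simp [hm]
    · rw [if_neg (by simp [hm])]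
      by_cases hd : pvIsoShape k
      · rw [if_pos hd, ih]
        simp [hm, hd]
      · rw [if_neg hd, ih]
        simp [hm, hd]

-- the descending lex-keyed sort of a duplicate-free list is the two descending bucket sorts, others first
theorem pv_main (cols : List String) (hnd : cols.Nodup) :
    PySem.List.sorted cols (fun col => toLex ((if pvIsoShape col then (0:Int) else 1), col)) true
      = PySem.List.sorted (cols.filter (fun k => !pvIsoShape k)) (fun x => x) true
        ++ PySem.List.sorted (cols.filter (fun k => pvIsoShape k)) (fun x => x) true := by
  set dts := cols.filter (fun k => pvIsoShape k) with hdts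
  set oth := cols.filter (fun k => !pvIsoShape k) with hoth
  set sO := PySem.List.sorted oth (fun x => x) true with hsO
  set sD := PySem.List.sorted dts (fun x => x) true with hsD
  have hpermO : sO.Perm oth := PySem.List.sorted_perm _ _ _
  have hpermD : sD.Perm dts := PySem.List.sorted_perm _ _ _
  have hperm : (sO ++ sD).Perm cols :=
    (hpermO.append hpermD).trans (by
      have := List.filter_append_perm (fun k => !pvIsoShape k) cols
      simpa using this)
  apply PySem.List.sorted_rev_eq_of_perm_of_pairwise_gt _ _ _ hperm
  have hmemO : ∀ x ∈ sO, pvIsoShape x = false := by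
    intro x hx
    have := hpermO.mem_iff.mp hx
    rw [hoth] at this
    simpa using (List.of_mem_filter this)
  have hmemD : ∀ x ∈ sD, pvIsoShape x = true := by
    intro x hx
    have := hpermD.mem_iff.mp hx
    exact List.of_mem_filter this
  have hndO : sO.Nodup := hpermO.symm.nodup (hnd.filter _)
  have hndD : sD.Nodup := hpermD.symm.nodup (hnd.filter _)
  have hstrictO : sO.Pairwise (fun a b => (b : String) < a) := by
    have hle := PySem.List.sorted_pairwise_rev oth (fun x => x)
    rw [← hsO] at hle
    exact (hle.and hndO).imp (fun {a b} h => lt_of_le_of_ne h.1 (fun he => h.2 he.symm))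
  have hstrictD : sD.Pairwise (fun a b => (b : String) < a) := by
    have hle := PySem.List.sorted_pairwise_rev dts (fun x => x)
    rw [← hsD] at hle
    exact (hle.and hndD).imp (fun {a b} h => lt_of_le_of_ne h.1 (fun he => h.2 he.symm))
  rw [List.pairwise_append]
  refine ⟨?_, ?_, ?_⟩
  · exact hstrictO.imp_of_mem (fun {a b} ha hb h => by
      simp [Prod.Lex.lt_iff, hmemO a ha, hmemO b hb, h])
  · exact hstrictD.imp_of_mem (fun {a b} ha hb h => by
      simp [Prod.Lex.lt_iff, hmemD a ha, hmemD b hb, h])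
  · intro a ha b hb
    simp [Prod.Lex.lt_iff, hmemO a ha, hmemD b hb]

-- ===== VERDICT (by name: the statement is the Claim_ definition above) =====
theorem statement_columns_py_spec : Claim_equal_statement_columns_py := by
  intro row _
  unfold Spec_statement_columns_py statement_columns_py statement_columns_py_alt
  cases row with
  | none => rfl
  | some r =>
    simp only []
    rw [pv_fold_partition, pv_sorted2_eq_sorted_lex]
    simp only [List.nil_append]
    exact pv_main _ ((PySem.List.nodup_dedup (r.map Prod.fst)).filter _)
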